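-- pv_equiv track=rewrite | github.com/Etn40ff/affine_dominance | software/domination.py | chebyshev
-- ===== SOURCE A (Python) =====
-- def chebyshev(k,eps,b,c):
--     if k == 0:
--         return 0
--     if k == 1:
--         return 1
--     if eps == 1:
--         return b*chebyshev(k-1,-eps,b,c) - chebyshev(k-2,eps,b,c)
--     else:
--         return c*chebyshev(k-1,-eps,b,c) - chebyshev(k-2,eps,b,c)
-- ===== SOURCE B (Python) =====
-- def chebyshev(k, eps, b, c):
--     if k == 0:
--         return 0
--     if k == 1:
--         return 1
--     # bottom-up DP: q = value at level j, p = value at level j-1; the eps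
--     # seen at level j alternates, chosen so that the top level k sees `eps`.
--     e = eps if k % 2 == 0 else -eps
--     p, q = 0, 1
--     for _ in range(k - 1):
--         p, q = q, (b if e == 1 else c) * q - p
--         e = -e
--     return q
-- ===== Notes on version B (the rewrite author's own statement) =====
-- stated objective: faster
-- what changed: Replaced the binary-branching top-down recursion by an iterative bottom-up DP keeping only the last two values, with the alternating eps reconstructed from the parity of k.
import Mathlib
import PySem

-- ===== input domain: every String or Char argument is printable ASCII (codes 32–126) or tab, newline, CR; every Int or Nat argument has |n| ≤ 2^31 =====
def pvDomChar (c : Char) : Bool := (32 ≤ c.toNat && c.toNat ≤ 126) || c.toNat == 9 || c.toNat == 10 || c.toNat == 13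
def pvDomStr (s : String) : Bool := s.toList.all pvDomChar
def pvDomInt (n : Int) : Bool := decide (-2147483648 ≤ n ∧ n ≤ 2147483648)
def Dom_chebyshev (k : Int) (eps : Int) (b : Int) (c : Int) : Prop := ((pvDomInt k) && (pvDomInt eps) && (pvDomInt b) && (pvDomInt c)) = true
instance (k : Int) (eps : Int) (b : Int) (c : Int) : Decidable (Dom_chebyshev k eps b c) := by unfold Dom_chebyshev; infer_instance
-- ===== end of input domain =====

-- B replaces A's O(2^k) top-down recursion by an O(k) bottom-up two-variable DP (faster: asymptotic).


-- ===== PORT A =====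
-- literal port of A; on k < 0 the Python recursion never terminates (RecursionError),
-- those inputs are outside Pre_chebyshev and the port returns 0 there only to be total.
def chebyshev (k : Int) (eps : Int) (b : Int) (c : Int) : Int :=
  if k == 0 then 0
  else if k == 1 then 1
  else if k < 0 then 0
  else if eps == 1 then b * chebyshev (k-1) (-eps) b c - chebyshev (k-2) eps b c
  else c * chebyshev (k-1) (-eps) b c - chebyshev (k-2) eps b c
termination_by k.toNat
decreasing_by all_goals (simp_all; omega)

-- ===== PORT B =====
-- the loop of Source B: n remaining iterations, state (p, q) and current e
def chebyshevLoop (n : Nat) (e : Int) (b : Int) (c : Int) (p : Int) (q : Int) : Int :=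
  match n with
  | 0 => q
  | n + 1 => chebyshevLoop n (-e) b c q ((if e == 1 then b else c) * q - p)

def chebyshev_alt (k : Int) (eps : Int) (b : Int) (c : Int) : Int :=
  if k == 0 then 0
  else if k == 1 then 1
  else chebyshevLoop (k - 1).toNat (if k % 2 == 0 then eps else -eps) b c 0 1

-- ===== PRECONDITION & SPEC =====
-- Pre_ excludes k < 0, where Python A exceeds the recursion limit (RecursionError).
def Pre_chebyshev (k : Int) (eps : Int) (b : Int) (c : Int) : Prop := 0 ≤ k
instance (k : Int) (eps : Int) (b : Int) (c : Int) : Decidable (Pre_chebyshev k eps b c) := by unfold Pre_chebyshev; infer_instance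
def pvWitness_chebyshev : Int × Int × Int × Int := (5, 1, 2, 3)

def Spec_chebyshev (k : Int) (eps : Int) (b : Int) (c : Int) (out : Int) : Prop := out = chebyshev_alt k eps b c
instance (k : Int) (eps : Int) (b : Int) (c : Int) (out : Int) : Decidable (Spec_chebyshev k eps b c out) := by unfold Spec_chebyshev; infer_instance

-- ===== CLAIM (what is proved, stated in full; the proofs are below) =====
def Claim_equal_chebyshev : Prop := ∀ (k : Int) (eps : Int) (b : Int) (c : Int), Dom_chebyshev k eps b c → Pre_chebyshev k eps b c → Spec_chebyshev k eps b c (chebyshev k eps b c)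

-- ===== LEMMAS AND PROOFS =====

-- unfolding of A's port at k ≥ 2
theorem chebyshev_step (k eps b c : Int) (hk : 2 ≤ k) :
    chebyshev k eps b c =
      (if eps == 1 then b else c) * chebyshev (k-1) (-eps) b c - chebyshev (k-2) eps b c := by
  rw [chebyshev]
  have h0 : (k == 0) = false := by simp; omega
  have h1 : (k == 1) = false := by simp; omega
  have h2 : ¬ k < 0 := by omega
  simp [h0, h1, h2]
  split <;> simp

-- loop invariant: starting from two consecutive A-values the loop computes A
theorem chebyshevLoop_spec (n : Nat) : ∀ (k e b c : Int), 1 ≤ k →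
    chebyshevLoop n e b c (chebyshev (k-1) e b c) (chebyshev k (-e) b c)
      = chebyshev (k + n) (if n % 2 = 0 then -e else e) b c := by
  induction n with
  | zero => intro k e b c hk; simp [chebyshevLoop]
  | succ n ih =>
    intro k e b c hk
    have hstep : (if e == 1 then b else c) * chebyshev k (-e) b c - chebyshev (k-1) e b c
        = chebyshev (k+1) e b c := by
      rw [chebyshev_step (k+1) e b c (by omega)]
      have e1 : k + 1 - 1 = k := by ring
      have e2 : k + 1 - 2 = k - 1 := by ring
      rw [e1, e2]
    rw [chebyshevLoop, hstep]
    have := ih (k+1) (-e) b c (by omega)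
    simp only [add_sub_cancel_right, neg_neg] at this
    rw [this]
    have hk' : k + 1 + (n : Int) = k + ((n : Nat) + 1 : Nat) := by push_cast; ring
    rw [hk']
    by_cases hp : n % 2 = 0
    · have hp' : (n + 1) % 2 ≠ 0 := by omega
      simp [hp, hp']
    · have hp' : (n + 1) % 2 = 0 := by omega
      simp [hp, hp']

theorem chebyshev_eq_alt (k eps b c : Int) (hk : 0 ≤ k) :
    chebyshev k eps b c = chebyshev_alt k eps b c := by
  unfold chebyshev_alt
  by_cases h0 : k = 0
  · subst h0; rw [chebyshev]; simp
  · by_cases h1 : k = 1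
    · subst h1; rw [chebyshev]; simp
    · have hk2 : 2 ≤ k := by omega
      have h0' : (k == 0) = false := by simp [h0]
      have h1' : (k == 1) = false := by simp [h1]
      simp only [h0', h1', Bool.false_eq_true, if_false]
      set e0 : Int := if k % 2 == 0 then eps else -eps with he0
      have hbase :
          chebyshevLoop (k-1).toNat e0 b c (chebyshev 0 e0 b c) (chebyshev 1 (-e0) b c)
            = chebyshev (1 + ((k-1).toNat : Int)) (if (k-1).toNat % 2 = 0 then -e0 else e0) b c := by
        calc chebyshevLoop (k-1).toNat e0 b c (chebyshev 0 e0 b c) (chebyshev 1 (-e0) b c)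
            = chebyshevLoop (k-1).toNat e0 b c (chebyshev (1-1) e0 b c) (chebyshev 1 (-e0) b c) := by norm_num
          _ = _ := chebyshevLoop_spec (k-1).toNat 1 e0 b c (by omega)
      have hcast : (1 : Int) + ((k-1).toNat : Int) = k := by omega
      have h01 : chebyshev 0 e0 b c = 0 := by rw [chebyshev]; simp
      have h11 : chebyshev 1 (-e0) b c = 1 := by rw [chebyshev]; simp
      rw [h01, h11] at hbase
      rw [hbase, hcast]
      congr 1
      -- final eps equals eps by parity of k
      by_cases hpar : k % 2 = 0
      · have hm : (k.toNat - 1) % 2 = 1 := by omega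
        simp [he0, hpar]
        intro h; omega
      · have hm : (k.toNat - 1) % 2 = 0 := by omega
        have hne : (k % 2 == 0) = false := by simp [hpar]
        simp [he0, hne]
        intro h; omega

-- ===== VERDICT (by name: the statement is the Claim_ definition above) =====
theorem chebyshev_spec : Claim_equal_chebyshev := by
  intro k eps b c _ hpre
  unfold Spec_chebyshev
  exact chebyshev_eq_alt k eps b c hpre
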